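-- pv_equiv track=rewrite | github.com/xChygyNx/Yandex-Praktikum | 8.Strings/j.py | max_retry
-- ===== SOURCE A (Python) =====
-- def max_retry(word: str) -> int:
--     retry = 1
--     for i in range(1, len(word)):
--         retry = 1
--         if len(word) % i == 0:
--             prefix = word[:i]
--             match = True
--             while len(prefix) * retry < len(word):
--                 next_piece = word[len(word) - retry*len(prefix): len(word) - (retry-1) * len(prefix)]
--                 if prefix != next_piece:
--                     match = False
--                     break
--                 retry += 1
--             if match:
--                 return retry
--     return retry
-- ===== SOURCE B (Python) =====
-- def max_retry(word: str) -> int: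
--     n = len(word)
--     for i in range(1, n):
--         if n % i == 0 and word[i:] == word[:n - i]:
--             return n // i
--     return 1
-- ===== Notes on version B (the rewrite author's own statement) =====
-- stated objective: simpler
-- what changed: The inner while loop that peels equal-length blocks off the end and counts them is replaced by a single shift comparison word[i:] == word[:n-i] (the standard characterization of a period), returning n // i directly.
import Mathlib
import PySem

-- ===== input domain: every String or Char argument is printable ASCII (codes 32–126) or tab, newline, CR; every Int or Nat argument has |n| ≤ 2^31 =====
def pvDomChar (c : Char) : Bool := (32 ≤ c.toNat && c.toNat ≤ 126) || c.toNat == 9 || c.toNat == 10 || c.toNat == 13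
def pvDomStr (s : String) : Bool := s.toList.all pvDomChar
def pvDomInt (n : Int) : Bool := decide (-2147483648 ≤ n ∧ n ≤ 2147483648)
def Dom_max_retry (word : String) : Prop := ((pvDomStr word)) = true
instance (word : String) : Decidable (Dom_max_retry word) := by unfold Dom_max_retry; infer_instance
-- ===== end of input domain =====

-- B replaces A's inner block-peeling while loop by one shift comparison word[i:] == word[:n-i]; objective: simpler.

-- ===== PORT A =====
-- inner while loop of A: compares the retry-th block from the end against the prefix;
-- fuel only makes the while loop total (it is called with fuel = len(word), always enough)
def pvAWhile (l pre : List Char) (retry fuel : Nat) : Nat × Bool :=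
  match fuel with
  | 0 => (retry, true)
  | fuel + 1 =>
    if pre.length * retry < l.length then
      let next_piece := PySem.List.slice l
        (some ((l.length : Int) - (retry : Int) * (pre.length : Int)))
        (some ((l.length : Int) - ((retry : Int) - 1) * (pre.length : Int)))
      if pre = next_piece then pvAWhile l pre (retry + 1) fuel
      else (retry, false)
    else (retry, true)

-- the for loop over i = 1 .. len-1, threading the leftover retry value exactly as A does
def pvALoop (l : List Char) (i : Nat) (retry : Int) : Int :=
  if _h : i < l.length then
    if l.length % i = 0 then
      let pre := PySem.List.slice l none (some (i : Int))
      let rb := pvAWhile l pre 1 l.length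
      if rb.2 then (rb.1 : Int) else pvALoop l (i + 1) (rb.1 : Int)
    else pvALoop l (i + 1) 1
  else retry
termination_by l.length - i

def max_retry (word : String) : Int := pvALoop word.toList 1 1

-- ===== PORT B =====
def pvBLoop (l : List Char) (i : Nat) : Int :=
  if _h : i < l.length then
    if l.length % i = 0 ∧ PySem.List.slice l (some (i : Int)) none
        = PySem.List.slice l none (some ((l.length : Int) - (i : Int))) then
      ((l.length / i : Nat) : Int)
    else pvBLoop l (i + 1)
  else 1
termination_by l.length - i

def max_retry_alt (word : String) : Int := pvBLoop word.toList 1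

-- ===== PRECONDITION & SPEC =====
def Spec_max_retry (word : String) (out : Int) : Prop := out = max_retry_alt word
instance (word : String) (out : Int) : Decidable (Spec_max_retry word out) := by unfold Spec_max_retry; infer_instance

-- ===== CLAIM (what is proved, stated in full; the proofs are below) =====
def Claim_equal_max_retry : Prop := ∀ (word : String), Dom_max_retry word → Spec_max_retry word (max_retry word)


-- ===== LEMMAS AND PROOFS =====

-- "the r-th block from the end equals the prefix"
def pvPieceEq (l : List Char) (i r : Nat) : Prop :=
  l.take i = (l.drop (l.length - r * i)).take i

-- "all blocks from the s-th on (counted from the end) equal the prefix"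
def pvBlocks (l : List Char) (i s : Nat) : Prop :=
  ∀ r, s ≤ r → i * r < l.length → pvPieceEq l i r

-- "l is periodic with period i on [i, n)", residue form
def pvPer (l : List Char) (i : Nat) : Prop :=
  ∀ m, i ≤ m → m < l.length → l[m]? = l[m % i]?

theorem pv_shift_iff_per (l : List Char) (i : Nat) (hi : 0 < i) :
    (∀ j, i + j < l.length → l[i + j]? = l[j]?) ↔ pvPer l i := by
  constructor
  · intro h m
    induction m using Nat.strong_induction_on with
    | _ m ih =>
      intro him hm
      have h1 : l[m]? = l[m - i]? := by
        have := h (m - i) (by omega)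
        rwa [show i + (m - i) = m by omega] at this
      by_cases h2 : m - i < i
      · rw [h1, Nat.mod_eq_sub_mod him, Nat.mod_eq_of_lt h2]
      · rw [h1, ih (m - i) (by omega) (by omega) (by omega), Nat.mod_eq_sub_mod him]
  · intro h j hj
    by_cases h2 : j < i
    · rw [h (i + j) (by omega) hj, Nat.add_comm, Nat.add_mod_right, Nat.mod_eq_of_lt h2]
    · rw [h (i + j) (by omega) hj, h j (by omega) (by omega), Nat.add_comm, Nat.add_mod_right]

theorem pv_drop_take_iff_shift (l : List Char) (i : Nat) (hi : i ≤ l.length) :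
    (l.drop i = l.take (l.length - i)) ↔ (∀ j, i + j < l.length → l[i + j]? = l[j]?) := by
  rw [List.ext_getElem?_iff]
  constructor
  · intro h j hj
    have := h j
    rwa [List.getElem?_drop, List.getElem?_take, if_pos (by omega)] at this
  · intro h j
    rw [List.getElem?_drop, List.getElem?_take]
    split
    · exact h j (by omega)
    · exact List.getElem?_eq_none (by omega)

theorem pv_blocks_iff_per (l : List Char) (i k : Nat) (hi : 0 < i) (hlt : i < l.length)
    (hk : l.length = i * k) : pvBlocks l i 1 ↔ pvPer l i := by
  have hk2 : 2 ≤ k := by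
    by_contra hc
    have : i * k ≤ i * 1 := Nat.mul_le_mul_left i (by omega)
    omega
  constructor
  · intro h m him hm
    set q := m / i with hq
    set t := m % i with ht
    have hdm : i * q + t = m := Nat.div_add_mod m i
    have htlt : t < i := Nat.mod_lt _ hi
    have hq1 : 1 ≤ q := by rw [hq]; exact (Nat.one_le_div_iff hi).2 him
    have hqk : q < k := by
      by_contra hc
      have : i * k ≤ i * q := Nat.mul_le_mul_left i (by omega)
      omega
    have hsum : i * (k - q) + i * q = i * k := by rw [← Nat.mul_add]; congr 1; omega
    have hblk := h (k - q) (by omega) (by omega)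
    unfold pvPieceEq at hblk
    have hnr : l.length - (k - q) * i = i * q := by rw [Nat.mul_comm (k - q) i]; omega
    rw [hnr] at hblk
    have := congrArg (fun xs => xs[t]?) hblk
    simp only [List.getElem?_take, if_pos htlt, List.getElem?_drop] at this
    rw [show i * q + t = m from hdm] at this
    rw [← this, ht]
  · intro h r hr hrlt
    unfold pvPieceEq
    have hrk : r < k := by
      by_contra hc
      have : i * k ≤ i * r := Nat.mul_le_mul_left i (by omega)
      omega
    have hsum : i * (k - r) + i * r = i * k := by rw [← Nat.mul_add]; congr 1; omega
    have h1k : 1 ≤ k - r := by omega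
    have hge : i * 1 ≤ i * (k - r) := Nat.mul_le_mul_left i h1k
    have hnr : l.length - r * i = i * (k - r) := by rw [Nat.mul_comm r i]; omega
    have hcomm : r * i = i * r := Nat.mul_comm r i
    have hir : i * 1 ≤ i * r := Nat.mul_le_mul_left i hr
    rw [List.ext_getElem?_iff]
    intro t
    rw [List.getElem?_take, List.getElem?_take, List.getElem?_drop]
    split
    · rename_i htlt
      have hm : l.length - r * i + t < l.length := by omega
      have hmge : i ≤ l.length - r * i + t := by omega
      have := h (l.length - r * i + t) hmge hm
      rw [hnr] at this ⊢
      rw [this, Nat.mul_comm i (k - r), Nat.add_comm, Nat.add_mul_mod_self_right,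
        Nat.mod_eq_of_lt htlt]
    · rfl

-- the slice A's while loop extracts is the r-th block from the end
theorem pv_slice_block (l : List Char) (i r : Nat) (hi : 0 < i) (hr : 1 ≤ r)
    (hlt : i * r < l.length) :
    PySem.List.slice l (some ((l.length : Int) - (r : Int) * (i : Int)))
      (some ((l.length : Int) - ((r : Int) - 1) * (i : Int)))
      = (l.drop (l.length - r * i)).take i := by
  obtain ⟨s, rfl⟩ : ∃ s, r = s + 1 := ⟨r - 1, by omega⟩
  have hmul : i * (s + 1) = (s + 1) * i := Nat.mul_comm _ _
  have hsi : s * i + i = (s + 1) * i := (Nat.succ_mul s i).symm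
  have hle : (s + 1) * i ≤ l.length := by omega
  have hle2 : s * i ≤ l.length := by omega
  have h1 : ((l.length : Int) - ((s : Int) + 1) * (i : Int))
      = ((l.length - (s + 1) * i : Nat) : Int) := by
    rw [Nat.cast_sub hle]; push_cast; ring
  have h2 : ((l.length : Int) - (((s : Int) + 1) - 1) * (i : Int))
      = ((l.length - s * i : Nat) : Int) := by
    rw [Nat.cast_sub hle2]; push_cast; ring
  rw [show ((s + 1 : Nat) : Int) = ((s : Int) + 1) by push_cast; ring] at *
  rw [h1, h2, PySem.List.slice_natCast]
  congr 1
  omega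

theorem pv_take_len (l : List Char) (i : Nat) (hle : i ≤ l.length) :
    (l.take i).length = i := by simp; omega

theorem pv_aWhile_true (l : List Char) (i k : Nat) (hi : 0 < i) (hlt : i < l.length)
    (hk : l.length = i * k) :
    ∀ fuel retry, 1 ≤ retry → retry ≤ k → k < fuel + retry → pvBlocks l i retry →
      pvAWhile l (l.take i) retry fuel = (k, true) := by
  intro fuel
  induction fuel with
  | zero => intro retry h1 h2 h3 _; omega
  | succ f ih =>
    intro retry h1 h2 h3 hB
    have hplen : (l.take i).length = i := pv_take_len l i (by omega)
    rw [pvAWhile]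
    simp only [hplen]
    by_cases hg : retry < k
    · have hguard : i * retry < l.length := by
        have : i * retry < i * k := by
          have := Nat.mul_le_mul_left i hg
          calc i * retry < i * retry + i := by omega
            _ = i * (retry + 1) := by rw [Nat.mul_add]; omega
            _ ≤ i * k := Nat.mul_le_mul_left i (by omega)
        omega
      rw [if_pos hguard]
      rw [pv_slice_block l i retry hi h1 hguard]
      have hp : List.take i l = List.take i (List.drop (l.length - retry * i) l) :=
        hB retry (le_refl _) hguard
      rw [if_pos hp]
      exact ih (retry + 1) (by omega) (by omega) (by omega)
        (fun r hr hrlt => hB r (by omega) hrlt)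
    · have hguard : ¬ i * retry < l.length := by
        have : i * k ≤ i * retry := Nat.mul_le_mul_left i (by omega)
        omega
      rw [if_neg hguard]
      congr 1
      omega

theorem pv_aWhile_false (l : List Char) (i k : Nat) (hi : 0 < i) (hlt : i < l.length)
    (hk : l.length = i * k) :
    ∀ fuel retry, 1 ≤ retry → retry ≤ k → k < fuel + retry → ¬ pvBlocks l i retry →
      (pvAWhile l (l.take i) retry fuel).2 = false := by
  intro fuel
  induction fuel with
  | zero => intro retry h1 h2 h3 _; omega
  | succ f ih =>
    intro retry h1 h2 h3 hB
    have hplen : (l.take i).length = i := pv_take_len l i (by omega)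
    by_cases hg : retry < k
    · have hguard : i * retry < l.length := by
        have : i * retry < i * k := by
          calc i * retry < i * retry + i := by omega
            _ = i * (retry + 1) := by rw [Nat.mul_add]; omega
            _ ≤ i * k := Nat.mul_le_mul_left i (by omega)
        omega
      rw [pvAWhile]
      simp only [hplen]
      rw [if_pos hguard]
      rw [pv_slice_block l i retry hi h1 hguard]
      by_cases hp : List.take i l = List.take i (List.drop (l.length - retry * i) l)
      · rw [if_pos hp]
        have hp' : pvPieceEq l i retry := hp
        exact ih (retry + 1) (by omega) (by omega) (by omega)
          (fun hB' => hB (fun r hr hrlt => by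
            rcases Nat.eq_or_lt_of_le hr with rfl | hlt'
            · exact hp' 
            · exact hB' r (by omega) hrlt))
      · rw [if_neg hp]
    · exfalso
      exact hB (fun r hr hrlt => by
        have : i * k ≤ i * r := Nat.mul_le_mul_left i (by omega)
        omega)

theorem pv_aWhile_fail_first (l : List Char) (i : Nat) (f retry : Nat) (hi : 0 < i)
    (h1 : 1 ≤ retry) (hguard : i * retry < l.length) (hp : ¬ pvPieceEq l i retry) :
    pvAWhile l (l.take i) retry (f + 1) = (retry, false) := by
  have hplen : (l.take i).length = i := pv_take_len l i
    (by have := Nat.mul_le_mul_left i h1; omega)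
  rw [pvAWhile]
  simp only [hplen]
  rw [if_pos hguard, pv_slice_block l i retry hi h1 hguard,
    if_neg (show ¬ List.take i l = List.take i (List.drop (l.length - retry * i) l) from hp)]

-- B's per-candidate shift comparison agrees with "all blocks match"
theorem pv_cond_iff (l : List Char) (i k : Nat) (hi : 0 < i) (hlt : i < l.length)
    (hk : l.length = i * k) :
    (PySem.List.slice l (some (i : Int)) none
        = PySem.List.slice l none (some ((l.length : Int) - (i : Int))))
      ↔ pvBlocks l i 1 := by
  rw [PySem.List.slice_from_natCast,
    show ((l.length : Int) - (i : Int)) = ((l.length - i : Nat) : Int) by omega,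
    PySem.List.slice_to_natCast]
  rw [pv_drop_take_iff_shift l i (by omega), pv_shift_iff_per l i hi,
    ← pv_blocks_iff_per l i k hi hlt hk]

-- at i = n-1 with i ∣ n we must have n = 2, i = 1
theorem pv_last_div (i n : Nat) (_h1 : 1 ≤ i) (h2 : i + 1 = n) (hdvd : i ∣ n) :
    i = 1 ∧ n = 2 := by
  have := Nat.dvd_sub hdvd (dvd_refl i)
  rw [show n - i = 1 by omega] at this
  have := Nat.dvd_one.mp this
  omega

theorem pv_loop_end (l : List Char) (retry : Int) :
    pvALoop l l.length retry = retry := by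
  rw [pvALoop]; simp

theorem pv_bloop_end (l : List Char) : pvBLoop l l.length = 1 := by
  rw [pvBLoop]; simp

theorem pv_loop_eq (l : List Char) :
    ∀ d i retry, l.length = i + d → 1 ≤ i → i < l.length →
      pvALoop l i retry = pvBLoop l i := by
  intro d
  induction d with
  | zero => intro i retry hd h1 h2; omega
  | succ e ih =>
    intro i retry hd h1 h2
    rw [pvALoop, pvBLoop]
    rw [dif_pos h2, dif_pos h2]
    by_cases hmod : l.length % i = 0
    · rw [if_pos hmod]
      obtain ⟨k, hk⟩ : i ∣ l.length := Nat.dvd_of_mod_eq_zero hmod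
      have hk2 : 2 ≤ k := by
        by_contra hc
        have : i * k ≤ i * 1 := Nat.mul_le_mul_left i (by omega)
        omega
      have hkdiv : l.length / i = k := by rw [hk, Nat.mul_div_cancel_left _ (by omega)]
      have hik : 1 * k ≤ i * k := Nat.mul_le_mul_right k h1
      have hpre : PySem.List.slice l none (some ((i : Nat) : Int)) = l.take i :=
        PySem.List.slice_to_natCast ..
      rw [hpre]
      dsimp only
      by_cases hB : pvBlocks l i 1
      · have hcond : l.length % i = 0 ∧ PySem.List.slice l (some (i : Int)) none
            = PySem.List.slice l none (some ((l.length : Int) - (i : Int))) :=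
          ⟨hmod, (pv_cond_iff l i k (by omega) h2 hk).2 hB⟩
        rw [pv_aWhile_true l i k (by omega) h2 hk l.length 1 (by omega) (by omega)
          (by omega) hB, if_pos hcond, hkdiv]
        norm_num
      · have hflag := pv_aWhile_false l i k (by omega) h2 hk l.length 1 (by omega)
          (by omega) (by omega) hB
        have hcondF : ¬ (l.length % i = 0 ∧ PySem.List.slice l (some (i : Int)) none
            = PySem.List.slice l none (some ((l.length : Int) - (i : Int)))) :=
          fun hc => hB ((pv_cond_iff l i k (by omega) h2 hk).1 hc.2)
        rw [hflag, if_neg (show ¬ (false = true) by simp), if_neg hcondF]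
        by_cases hnext : i + 1 < l.length
        · exact ih (i + 1) _ (by omega) (by omega) hnext
        · -- i = n - 1 and i ∣ n, so n = 2, i = 1: the single comparison failed at retry 1
          obtain ⟨hi1, hn2⟩ := pv_last_div i l.length h1 (by omega) ⟨k, hk⟩
          have hp1 : ¬ pvPieceEq l i 1 := fun hp => hB (fun r hr hrlt => by
            have : r = 1 := by rw [hi1] at hrlt; omega
            subst this; exact hp)
          have hcomp : pvAWhile l (l.take i) 1 l.length = (1, false) := by
            rw [hn2]
            exact pv_aWhile_fail_first l i 1 1 (by omega) (le_refl _) (by omega) hp1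
          rw [hcomp]
          rw [show i + 1 = l.length by omega, pv_loop_end, pv_bloop_end]
          norm_num
    · rw [if_neg hmod, if_neg (fun hc => hmod hc.1)]
      by_cases hnext : i + 1 < l.length
      · exact ih (i + 1) _ (by omega) (by omega) hnext
      · rw [show i + 1 = l.length by omega, pv_loop_end, pv_bloop_end]

-- ===== VERDICT (by name: the statement is the Claim_ definition above) =====
theorem max_retry_spec : Claim_equal_max_retry := by
  intro word _
  unfold Spec_max_retry max_retry max_retry_alt
  by_cases h : 1 < word.toList.length
  · exact pv_loop_eq word.toList (word.toList.length - 1) 1 1 (by omega) (le_refl _) h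
  · rw [pvALoop, pvBLoop]
    rw [dif_neg h, dif_neg h]
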